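-- pv_equiv track=rewrite | github.com/aertsimon90/ElongatorLib | __init__.py | left_elongation
-- ===== SOURCE A (Python) =====
-- def left_elongation(i, length):
-- 	li = len(i)
-- 	while li < length:
-- 		diff = length-li
-- 		new = []
-- 		for h in i:
-- 			if diff:
-- 				new.append(h)
-- 				diff -= 1
-- 			new.append(h)
-- 		i = new
-- 		li = len(i)
-- 	return i
-- ===== SOURCE B (Python) =====
-- def left_elongation(i, length):
--     c = [1] * len(i)
--     total = len(i)
--     while total < length:
--         diff = length - total
--         for k in range(len(i)):
--             d = min(diff, c[k])
--             c[k] += d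
--             total += d
--             diff -= d
--     return [x for k, x in enumerate(i) for _ in range(c[k])]
-- ===== Notes on version B (the rewrite author's own statement) =====
-- stated objective: alternative
-- what changed: B keeps one multiplicity counter per original position and runs the doubling passes on those counters, flattening once at the end, instead of rebuilding the whole expanded list on every pass.
import Mathlib
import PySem

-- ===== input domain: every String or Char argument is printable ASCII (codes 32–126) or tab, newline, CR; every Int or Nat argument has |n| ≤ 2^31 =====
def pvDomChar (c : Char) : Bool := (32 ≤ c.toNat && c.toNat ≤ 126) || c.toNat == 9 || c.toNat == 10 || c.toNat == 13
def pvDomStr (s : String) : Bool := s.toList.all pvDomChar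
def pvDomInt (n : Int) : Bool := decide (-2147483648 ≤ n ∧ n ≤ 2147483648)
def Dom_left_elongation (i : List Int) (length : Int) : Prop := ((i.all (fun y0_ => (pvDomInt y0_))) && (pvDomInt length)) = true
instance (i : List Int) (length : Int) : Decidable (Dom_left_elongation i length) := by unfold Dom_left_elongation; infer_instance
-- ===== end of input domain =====

-- B grows an integer multiplicity per original position instead of rebuilding the whole
-- expanded list on each pass, flattening the counts once at the end (alternative algorithm).

-- ===== PORT A =====
-- inner `for h in i` loop of A: doubles an element while diff ≠ 0
def leA_pass : List Int → Int → (List Int × Int)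
  | [], diff => ([], diff)
  | h :: rest, diff =>
    if diff ≠ 0 then
      let p := leA_pass rest (diff - 1)
      (h :: h :: p.1, p.2)
    else
      let p := leA_pass rest diff
      (h :: p.1, p.2)

-- the `while li < length` loop; the fuel only makes the recursion total
-- (on i = [] with length > 0 the Python loop never terminates; both ports share the fuel)
def leA_loop (length : Int) : Nat → List Int → List Int
  | 0, i => i
  | fuel + 1, i =>
    if (i.length : Int) < length then
      leA_loop length fuel (leA_pass i (length - (i.length : Int))).1
    else i

def left_elongation (i : List Int) (length : Int) : List Int :=
  leA_loop length (length.toNat + 1) i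

-- ===== PORT B =====
-- inner `for k in range(len(i))` loop of B over the count list c
def leB_pass : List Int → Int → Int → (List Int × Int × Int)
  | [], tot, diff => ([], tot, diff)
  | ck :: rest, tot, diff =>
    let d := min diff ck
    let p := leB_pass rest (tot + d) (diff - d)
    ((ck + d) :: p.1, p.2)

-- the `while total < length` loop over (c, total); same totality fuel as A's port
def leB_loop (length : Int) : Nat → List Int → Int → List Int
  | 0, c, _ => c
  | fuel + 1, c, tot =>
    if tot < length then
      let p := leB_pass c tot (length - tot)
      leB_loop length fuel p.1 p.2.1
    else c

def left_elongation_alt (i : List Int) (length : Int) : List Int :=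
  let c := List.replicate i.length (1 : Int)
  let cf := leB_loop length (length.toNat + 1) c (i.length : Int)
  (i.zip cf).flatMap (fun p => List.replicate p.2.toNat p.1)

-- ===== PRECONDITION & SPEC =====
def Spec_left_elongation (i : List Int) (length : Int) (out : List Int) : Prop := out = left_elongation_alt i length
instance (i : List Int) (length : Int) (out : List Int) : Decidable (Spec_left_elongation i length out) := by unfold Spec_left_elongation; infer_instance

-- ===== CLAIM (what is proved, stated in full; the proofs are below) =====
def Claim_equal_left_elongation : Prop := ∀ (i : List Int) (length : Int), Dom_left_elongation i length → Spec_left_elongation i length (left_elongation i length)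

-- ===== LEMMAS AND PROOFS =====

-- expansion of the count list into the final result
def leExp (i c : List Int) : List Int :=
  (i.zip c).flatMap (fun p => List.replicate p.2.toNat p.1)

theorem leExp_cons (x ck : Int) (i c : List Int) :
    leExp (x :: i) (ck :: c) = List.replicate ck.toNat x ++ leExp i c := by
  simp [leExp]

-- A's inner pass over a block of n equal elements
theorem leA_pass_replicate (n : Nat) (x : Int) (rest : List Int) (diff : Int)
    (hd : 0 ≤ diff) :
    leA_pass (List.replicate n x ++ rest) diff =
      (List.replicate (n + (min diff (n : Int)).toNat) x ++
        (leA_pass rest (diff - min diff (n : Int))).1,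
       (leA_pass rest (diff - min diff (n : Int))).2) := by
  induction n generalizing diff with
  | zero =>
    have : min diff (0 : Int) = 0 := by omega
    simp [this]
  | succ n ih =>
    by_cases h0 : diff = 0
    · subst h0
      have hm : min (0 : Int) ((n : Int) + 1) = 0 := by omega
      have hm' : min (0 : Int) (n : Int) = 0 := by omega
      simp [List.replicate_succ, leA_pass, ih 0 le_rfl, hm, List.replicate_succ]
    · have hd1 : 0 ≤ diff - 1 := by omega
      have hmin : min diff ((n : Int) + 1) = min (diff - 1) (n : Int) + 1 := by omega
      have hcount : (n + 1) + (min diff ((n : Int) + 1)).toNat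
          = (n + (min (diff - 1) (n : Int)).toNat) + 2 := by omega
      have hdiff : diff - min diff ((n : Int) + 1) = diff - 1 - min (diff - 1) (n : Int) := by
        omega
      simp only [List.replicate_succ, List.cons_append, leA_pass, h0, if_true,
        ne_eq, not_false_iff, ih (diff - 1) hd1]
      push_cast
      rw [hdiff, hcount]
      rw [show n + (min (diff - 1) (n : Int)).toNat + 2
            = (n + (min (diff - 1) (n : Int)).toNat + 1) + 1 from rfl]
      simp [List.replicate_succ]

-- B's pass keeps the counts nonnegative and the length of c
theorem leB_pass_nonneg (c : List Int) (tot diff : Int) (hd : 0 ≤ diff)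
    (hc : ∀ x ∈ c, 0 ≤ x) : ∀ x ∈ (leB_pass c tot diff).1, 0 ≤ x := by
  induction c generalizing tot diff with
  | nil => simp [leB_pass]
  | cons ck rest ih =>
    have hck : 0 ≤ ck := hc ck (by simp)
    have hdmin : 0 ≤ min diff ck := by omega
    intro x hx
    simp only [leB_pass, List.mem_cons] at hx
    rcases hx with h | h
    · omega
    · exact ih (tot + min diff ck) (diff - min diff ck) (by omega)
        (fun y hy => hc y (by simp [hy])) x h

-- the core pass correspondence: A's pass over the expanded list is B's pass on counts
theorem pass_eq (i c : List Int) (tot diff : Int)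
    (hlen : i.length = c.length) (hd : 0 ≤ diff) (hc : ∀ x ∈ c, 0 ≤ x) :
    leA_pass (leExp i c) diff =
      (leExp i (leB_pass c tot diff).1, (leB_pass c tot diff).2.2) ∧
    (leB_pass c tot diff).2.1 - tot
      = ((leExp i (leB_pass c tot diff).1).length : Int) - ((leExp i c).length : Int) := by
  induction i generalizing c tot diff with
  | nil =>
    cases c with
    | nil => simp [leExp, leB_pass, leA_pass]
    | cons ck rest => simp at hlen
  | cons x i ih =>
    cases c with
    | nil => simp at hlen
    | cons ck rest =>
      have hck : 0 ≤ ck := hc ck (by simp)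
      have hdmin : 0 ≤ min diff ck := by omega
      have hlen' : i.length = rest.length := by simpa using hlen
      have hc' : ∀ y ∈ rest, 0 ≤ y := fun y hy => hc y (by simp [hy])
      have hmin : min diff ((ck.toNat : Int)) = min diff ck := by omega
      have h1 := leA_pass_replicate ck.toNat x (leExp i rest) diff hd
      have ih' := ih rest (tot + min diff ck) (diff - min diff ck) hlen' (by omega) hc'
      constructor
      · rw [leExp_cons, h1, hmin, ih'.1]
        simp only [leB_pass, leExp_cons]
        have h2 : (ck + min diff ck).toNat = ck.toNat + (min diff ck).toNat := by omega
        rw [h2]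
      · have heq : (leB_pass (ck :: rest) tot diff).2.1
            = (leB_pass rest (tot + min diff ck) (diff - min diff ck)).2.1 := by
          simp [leB_pass]
        have hfst : (leB_pass (ck :: rest) tot diff).1
            = (ck + min diff ck) :: (leB_pass rest (tot + min diff ck) (diff - min diff ck)).1 := by
          simp [leB_pass]
        rw [heq, hfst, leExp_cons, leExp_cons]
        have h2 := ih'.2
        simp only [List.length_append, List.length_replicate] at *
        push_cast at h2 ⊢
        have : ((ck + min diff ck).toNat : Int) = (ck.toNat : Int) + min diff ck := by omega
        rw [this]
        omega

theorem leB_pass_length (c : List Int) (tot diff : Int) :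
    (leB_pass c tot diff).1.length = c.length := by
  induction c generalizing tot diff with
  | nil => rfl
  | cons ck rest ih => simp [leB_pass, ih]

-- the loop correspondence, by induction on the shared fuel
theorem loop_eq (length : Int) (fuel : Nat) : ∀ (i c : List Int) (tot : Int),
    i.length = c.length → (∀ x ∈ c, 0 ≤ x) → tot = ((leExp i c).length : Int) →
    leA_loop length fuel (leExp i c) = leExp i (leB_loop length fuel c tot) := by
  induction fuel with
  | zero => intro i c tot _ _ _; rfl
  | succ fuel ih =>
    intro i c tot hlen hc htot
    by_cases hcond : tot < length
    · have hd : 0 ≤ length - tot := by omega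
      have hp := pass_eq i c tot (length - tot) hlen hd hc
      simp only [leA_loop, leB_loop, ← htot, hcond, if_true]
      rw [hp.1]
      exact ih i (leB_pass c tot (length - tot)).1 (leB_pass c tot (length - tot)).2.1
        (by rw [leB_pass_length]; exact hlen)
        (leB_pass_nonneg c tot (length - tot) hd hc)
        (by have := hp.2; omega)
    · simp only [leA_loop, leB_loop, ← htot, hcond, if_false]

theorem leExp_ones (i : List Int) : leExp i (List.replicate i.length 1) = i := by
  induction i with
  | nil => rfl
  | cons x i ih => simpa [List.replicate_succ, leExp_cons] using ih

-- ===== VERDICT (by name: the statement is the Claim_ definition above) =====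
theorem left_elongation_spec : Claim_equal_left_elongation := by
  intro i length _
  unfold Spec_left_elongation left_elongation left_elongation_alt
  have hones : ∀ x ∈ List.replicate i.length (1 : Int), (0 : Int) ≤ x := by
    intro x hx; simp at hx; omega
  have h := loop_eq length (length.toNat + 1) i (List.replicate i.length 1) (i.length : Int)
    (by simp) hones (by rw [leExp_ones])
  rw [leExp_ones] at h
  simpa [leExp] using h
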